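-- pv_equiv track=rewrite | github.com/geneing/TensorFlowTTS | tensorflow_tts/processor/ljspeech.py | clean_g2p
-- ===== SOURCE A (Python) =====
-- def clean_g2p(g2p_text: list):
--     data = []
--     for i, txt in enumerate(g2p_text):
--         if i == len(g2p_text) - 1:
--             if txt != " " and txt != "SIL":
--                 #data.append("@" + txt)
--                 pass
--             else:
--                 data.append(
--                     "END"
--                 )  # TODO try learning without end token and compare results
--             break
--         data.append(txt) if txt != " " else data.append(
--             "SIL"
--         )  # TODO change it in inference
--     return data
-- ===== SOURCE B (Python) =====
-- def clean_g2p(g2p_text: list):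
--     # Back-to-front: walk the tokens in reverse, decide the END token first
--     # (from the final token), accumulate the body reversed, then flip once.
--     out_rev = []
--     first = True
--     for txt in reversed(g2p_text):
--         if first:
--             if txt == " " or txt == "SIL":
--                 out_rev.append("END")
--             first = False
--         else:
--             out_rev.append("SIL" if txt == " " else txt)
--     out_rev.reverse()
--     return out_rev
-- ===== Notes on version B (the rewrite author's own statement) =====
-- stated objective: alternative
-- what changed: Replaces A's forward enumerate loop with a per-iteration last-index guard and break by a reverse traversal that decides the END token first, builds the output back-to-front and reverses it once at the end.
import Mathlib
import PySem

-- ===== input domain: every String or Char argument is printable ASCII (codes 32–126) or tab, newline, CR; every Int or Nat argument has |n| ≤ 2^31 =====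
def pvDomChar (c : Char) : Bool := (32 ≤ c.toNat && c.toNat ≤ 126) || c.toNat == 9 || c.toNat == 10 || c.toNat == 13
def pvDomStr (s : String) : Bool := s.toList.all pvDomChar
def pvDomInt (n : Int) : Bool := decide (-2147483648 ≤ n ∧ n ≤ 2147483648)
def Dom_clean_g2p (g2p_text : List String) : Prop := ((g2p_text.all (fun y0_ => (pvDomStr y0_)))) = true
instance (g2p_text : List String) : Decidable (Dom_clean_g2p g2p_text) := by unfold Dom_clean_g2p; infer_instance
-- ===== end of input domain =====

-- B replaces A's forward enumerate loop (per-iteration last-index guard + break) by a reverse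
-- traversal that decides END first, builds the output back-to-front and reverses once (objective: alternative).

-- ===== PORT A =====
-- A's enumerate loop with break: i is the current index, n = len(g2p_text), data the accumulator.
def clean_g2p_loop (n i : Nat) : List String → List String → List String
  | [], data => data
  | txt :: rest, data =>
    if i = n - 1 then
      -- last iteration: append END unless txt is neither " " nor "SIL"; then break
      (if txt ≠ " " ∧ txt ≠ "SIL" then data else data ++ ["END"])
    else
      clean_g2p_loop n (i + 1) rest (if txt ≠ " " then data ++ [txt] else data ++ ["SIL"])

def clean_g2p (g2p_text : List String) : List String :=
  clean_g2p_loop g2p_text.length 0 g2p_text []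

-- ===== PORT B =====
-- Source B's loop over reversed(g2p_text): `first` flag, accumulator out_rev, final reverse.
def clean_g2p_alt_loop : List String → Bool → List String → List String
  | [], _, out_rev => out_rev
  | txt :: rest, first, out_rev =>
    if first then
      clean_g2p_alt_loop rest false
        (if txt = " " ∨ txt = "SIL" then out_rev ++ ["END"] else out_rev)
    else
      clean_g2p_alt_loop rest false (out_rev ++ [if txt = " " then "SIL" else txt])

def clean_g2p_alt (g2p_text : List String) : List String :=
  (clean_g2p_alt_loop g2p_text.reverse true []).reverse

-- ===== PRECONDITION & SPEC =====
def Spec_clean_g2p (g2p_text : List String) (out : List String) : Prop := out = clean_g2p_alt g2p_text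
instance (g2p_text : List String) (out : List String) : Decidable (Spec_clean_g2p g2p_text out) := by unfold Spec_clean_g2p; infer_instance

-- ===== CLAIM (what is proved, stated in full; the proofs are below) =====
def Claim_equal_clean_g2p : Prop := ∀ (g2p_text : List String), Dom_clean_g2p g2p_text → Spec_clean_g2p g2p_text (clean_g2p g2p_text)

-- ===== LEMMAS AND PROOFS =====
-- reference form both ports are reduced to: map over the body ++ optional END
def pvRef (g : List String) : List String :=
  match g.getLast? with
  | none => []
  | some last =>
    (g.dropLast.map (fun txt => if txt = " " then "SIL" else txt)) ++
      (if last = " " ∨ last = "SIL" then ["END"] else [])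

theorem clean_g2p_loop_eq (g : List String) : ∀ (i : Nat) (data : List String),
    clean_g2p_loop (i + g.length) i g data = data ++ pvRef g := by
  induction g with
  | nil => intro i data; simp [clean_g2p_loop, pvRef]
  | cons t rest ih =>
    intro i data
    cases rest with
    | nil =>
      by_cases h1 : t = " "
      · simp [clean_g2p_loop, pvRef, h1]
      · by_cases h2 : t = "SIL" <;> simp [clean_g2p_loop, pvRef, h1, h2]
    | cons u us =>
      have harith : i + (t :: u :: us).length = i + 1 + (u :: us).length := by
        simp [List.length_cons]; omega
      have hne : i ≠ i + 1 + (u :: us).length - 1 := by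
        simp [List.length_cons]; omega
      rw [harith, clean_g2p_loop, if_neg hne, ih (i + 1)]
      have halt : pvRef (t :: u :: us) =
          (if t = " " then "SIL" else t) :: pvRef (u :: us) := by
        cases h : (u :: us).getLast? with
        | none => simp [List.getLast?_eq_none_iff] at h
        | some v => simp [pvRef, List.getLast?_cons_cons, h]
      rw [halt]
      by_cases h1 : t = " " <;> simp [h1]

theorem clean_g2p_alt_loop_false (l : List String) : ∀ (out_rev : List String),
    clean_g2p_alt_loop l false out_rev =
      out_rev ++ l.map (fun txt => if txt = " " then "SIL" else txt) := by
  induction l with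
  | nil => intro out_rev; simp [clean_g2p_alt_loop]
  | cons t rest ih => intro out_rev; simp [clean_g2p_alt_loop, ih]

theorem clean_g2p_alt_eq_ref (g : List String) : clean_g2p_alt g = pvRef g := by
  rcases List.eq_nil_or_concat g with h | ⟨xs, x, h⟩
  · simp [h, clean_g2p_alt, clean_g2p_alt_loop, pvRef]
  · subst h
    rw [List.concat_eq_append]
    have hrev : (xs ++ [x]).reverse = x :: xs.reverse := by simp
    rw [clean_g2p_alt, hrev, clean_g2p_alt_loop, if_pos rfl,
      clean_g2p_alt_loop_false, pvRef]
    by_cases hx : x = " " ∨ x = "SIL" <;>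
      simp [hx, List.map_reverse]

-- ===== VERDICT (by name: the statement is the Claim_ definition above) =====
theorem clean_g2p_spec : Claim_equal_clean_g2p := by
  intro g _
  unfold Spec_clean_g2p clean_g2p
  rw [clean_g2p_alt_eq_ref]
  simpa using clean_g2p_loop_eq g 0 []
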